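-- pv_equiv track=rewrite | github.com/asifhaider/Numerical-Methods_2-1 | Interpolation Technique/main.py | obtain_x_values
-- ===== SOURCE A (Python) =====
-- def obtain_x_values(points, target, polynomial_order):
--     interpolates = []
--     for i in range(len(points) - 1):
--         if points[i] < target < points[i + 1]:
--             interpolates.append(points[i])
--             interpolates.append(points[i + 1])
--             if polynomial_order == 1:
--                 break
--             else:
--                 multiple = int(polynomial_order / 2)
--                 remainder = (polynomial_order % 2)
--                 start = i
--                 end = i + 1
--                 if remainder == 1:
--                     while multiple:
--                         start = start - 1
--                         end = end + 1
--                         interpolates.append(points[start])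
--                         interpolates.append(points[end])
--                         multiple = multiple - 1
--                 else:
--                     while multiple-1:
--                         start = start - 1
--                         end = end + 1
--                         interpolates.append(points[start])
--                         interpolates.append(points[end])
--                         multiple = multiple - 1
--                     if (target - points[start - 1]) <= (points[end + 1] - target):
--                         interpolates.append(points[start - 1])
--                     else:
--                         interpolates.append(points[end + 1])
--     interpolates.sort()
--     return interpolates
-- ===== SOURCE B (Python) =====
-- def obtain_x_values(points, target, polynomial_order):
--     # Same nodes as the original, but the outward two-pointer expansion loops are
--     # replaced by closed-form slices of the contiguous node window.
--     n = len(points)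
--     out = []
--     for i in range(n - 1):
--         if points[i] < target < points[i + 1]:
--             if polynomial_order == 1:
--                 out.extend(points[i:i + 2])
--                 break
--             m = polynomial_order // 2
--             if polynomial_order % 2:
--                 out.extend(points[i - m:i + m + 2])
--             else:
--                 left, right = points[i - m], points[i + m + 1]
--                 out.extend(points[i - m + 1:i + m + 1])
--                 out.append(left if target - left <= right - target else right)
--     out.sort()
--     return out
-- ===== Notes on version B (the rewrite author's own statement) =====
-- stated objective: simpler
-- what changed: B replaces A's mutable start/end two-pointer while-loops (which walk outward appending one pair of nodes per iteration, with a parity split into two loop bodies) by closed-form slice extraction of the contiguous node window around the containing interval. Pre_ excludes matches with non-positive polynomial_order or a node window leaving the list, where A raises IndexError or returns values produced by accidental negative-index wraparound.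
-- outside the precondition, e.g. on obtain_x_values([0, 10, 20], 5, 3): A returns [0, 10, 20, 20], B returns [20]; on obtain_x_values([0, 10], 5, -1): A returns [0, 10], B returns []
import Mathlib
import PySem

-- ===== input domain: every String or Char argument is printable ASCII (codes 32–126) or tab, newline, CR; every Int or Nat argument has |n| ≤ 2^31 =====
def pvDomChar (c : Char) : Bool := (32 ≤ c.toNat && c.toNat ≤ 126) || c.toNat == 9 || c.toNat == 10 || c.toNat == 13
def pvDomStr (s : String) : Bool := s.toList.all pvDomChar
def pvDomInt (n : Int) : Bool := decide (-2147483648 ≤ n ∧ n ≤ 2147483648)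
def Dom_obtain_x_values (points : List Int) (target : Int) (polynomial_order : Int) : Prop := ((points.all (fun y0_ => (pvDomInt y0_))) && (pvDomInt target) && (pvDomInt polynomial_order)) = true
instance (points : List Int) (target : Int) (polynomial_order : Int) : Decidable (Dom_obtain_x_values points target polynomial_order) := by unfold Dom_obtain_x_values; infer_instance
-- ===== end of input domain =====

-- B replaces A's mutable start/end two-pointer expansion while-loops by closed-form slices of the
-- contiguous node window (objective: simpler).

-- ===== PORT A =====

-- points[j] as a total function; Pre_ keeps every index A reads nonnegative and in range
def pvGet (xs : List Int) (j : Int) : Int := PySem.List.pyGetD xs j 0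

-- A's inner while-loops: k iterations of
--   start -= 1; end += 1; append points[start]; append points[end]
-- (k = the number of iterations Python performs on every input admitted by Pre_)
def pvAExpand (points : List Int) (start e : Int) (acc : List Int) : Nat → Int × Int × List Int
  | 0 => (start, e, acc)
  | k + 1 => pvAExpand points (start - 1) (e + 1)
      (acc ++ [pvGet points (start - 1), pvGet points (e + 1)]) k

-- A's 'for i in range(len(points)-1)' loop, body transcribed branch for branch
def pvAGo (points : List Int) (target polynomial_order : Int) : List Nat → List Int → List Int
  | [], acc => acc
  | i :: rest, acc =>
    if pvGet points (i : Int) < target ∧ target < pvGet points ((i : Int) + 1) then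
      let acc1 := acc ++ [pvGet points (i : Int), pvGet points ((i : Int) + 1)]
      if polynomial_order = 1 then acc1  -- break
      else
        -- int(polynomial_order / 2): float division then truncation = Int.tdiv (exact on |p| ≤ 2^31)
        let m := Int.tdiv polynomial_order 2
        let r := PySem.Int.mod polynomial_order 2
        if r = 1 then
          -- 'while multiple:' — m iterations (Pre_ admits only executions with m ≥ 1 here)
          let res := pvAExpand points (i : Int) ((i : Int) + 1) acc1 m.toNat
          pvAGo points target polynomial_order rest res.2.2
        else
          -- 'while multiple-1:' — m-1 iterations, then one extra nearest endpoint
          let res := pvAExpand points (i : Int) ((i : Int) + 1) acc1 (m - 1).toNat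
          let acc2 :=
            if target - pvGet points (res.1 - 1) ≤ pvGet points (res.2.1 + 1) - target then
              res.2.2 ++ [pvGet points (res.1 - 1)]
            else
              res.2.2 ++ [pvGet points (res.2.1 + 1)]
          pvAGo points target polynomial_order rest acc2
    else pvAGo points target polynomial_order rest acc

def obtain_x_values (points : List Int) (target : Int) (polynomial_order : Int) : List Int :=
  PySem.List.sorted
    (pvAGo points target polynomial_order (List.range (points.length - 1)) [])
    (fun x => x) false

-- ===== PORT B =====

-- B's 'for i in range(n-1)' loop: each match contributes a slice (plus one endpoint if even order)
def pvBGo (points : List Int) (target polynomial_order : Int) : List Nat → List Int → List Int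
  | [], acc => acc
  | i :: rest, acc =>
    if pvGet points (i : Int) < target ∧ target < pvGet points ((i : Int) + 1) then
      if polynomial_order = 1 then
        acc ++ PySem.List.slice points (some (i : Int)) (some ((i : Int) + 2))  -- break
      else
        let m := PySem.Int.floordiv polynomial_order 2
        if PySem.Int.mod polynomial_order 2 ≠ 0 then
          pvBGo points target polynomial_order rest
            (acc ++ PySem.List.slice points (some ((i : Int) - m)) (some ((i : Int) + m + 2)))
        else
          let left := pvGet points ((i : Int) - m)
          let right := pvGet points ((i : Int) + m + 1)
          let extra := if target - left ≤ right - target then left else right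
          pvBGo points target polynomial_order rest
            (acc ++ PySem.List.slice points (some ((i : Int) - m + 1)) (some ((i : Int) + m + 1))
                 ++ [extra])
    else pvBGo points target polynomial_order rest acc

def obtain_x_values_alt (points : List Int) (target : Int) (polynomial_order : Int) : List Int :=
  PySem.List.sorted
    (pvBGo points target polynomial_order (List.range (points.length - 1)) [])
    (fun x => x) false

-- ===== PRECONDITION & SPEC =====
-- Pre_ excludes exactly the matched intervals on which A misbehaves: with polynomial_order ≤ 0 or a
-- node window leaving the list, A either raises IndexError or returns values read by accidental
-- negative-index wraparound (an artefact of Python's points[start] with start < 0).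
def Pre_obtain_x_values (points : List Int) (target : Int) (polynomial_order : Int) : Prop :=
  ∀ i : Nat, i < points.length - 1 →
    points.getD i 0 < target → target < points.getD (i + 1) 0 →
    1 ≤ polynomial_order ∧
      (2 ≤ polynomial_order →
        PySem.Int.floordiv polynomial_order 2 ≤ (i : Int) ∧
        (i : Int) + PySem.Int.floordiv polynomial_order 2 + 2 ≤ (points.length : Int))
instance (points : List Int) (target : Int) (polynomial_order : Int) : Decidable (Pre_obtain_x_values points target polynomial_order) := by unfold Pre_obtain_x_values; infer_instance

def pvWitness_obtain_x_values : List Int × Int × Int := ([0, 5, 10, 20], 7, 2)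

def Spec_obtain_x_values (points : List Int) (target : Int) (polynomial_order : Int) (out : List Int) : Prop := out = obtain_x_values_alt points target polynomial_order
instance (points : List Int) (target : Int) (polynomial_order : Int) (out : List Int) : Decidable (Spec_obtain_x_values points target polynomial_order out) := by unfold Spec_obtain_x_values; infer_instance

-- ===== CLAIM (what is proved, stated in full; the proofs are below) =====
def Claim_equal_obtain_x_values : Prop := ∀ (points : List Int) (target : Int) (polynomial_order : Int), Dom_obtain_x_values points target polynomial_order → Pre_obtain_x_values points target polynomial_order → Spec_obtain_x_values points target polynomial_order (obtain_x_values points target polynomial_order)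

-- ===== LEMMAS AND PROOFS =====

-- a slice with in-range bounds is the window of values at the contiguous indices
theorem slice_as_map (xs : List Int) (a b : Int) (h0 : 0 ≤ a) (hab : a ≤ b) (hb : b ≤ xs.length) :
    PySem.List.slice xs (some a) (some b) = (PySem.List.pyRange a b 1).map (fun j => PySem.List.pyGetD xs j 0) := by
  have happ := PySem.List.pyRange_one_append a b xs.length hab hb
  have hmap := PySem.List.map_pyGetD_pyRange' (xs := xs) (a := a) (d := 0) h0
  rw [happ, List.map_append] at hmap
  have h2 : (PySem.List.pyRange a b 1).map (fun j => PySem.List.pyGetD xs j 0)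
      = ((PySem.List.pyRange a b 1).map (fun j => PySem.List.pyGetD xs j 0)
         ++ (PySem.List.pyRange b xs.length 1).map (fun j => PySem.List.pyGetD xs j 0)).take
          ((PySem.List.pyRange a b 1).map (fun j => PySem.List.pyGetD xs j 0)).length := by
    rw [List.take_left]
  rw [h2, hmap, List.length_map, PySem.List.length_pyRange_one,
      PySem.List.slice_toNat (xs := xs) (a := a) (b := b) h0 (le_trans h0 hab)]
  congr 1
  omega

-- closed form of A's expansion loop: final pointers and the appended interleaved values
theorem pvAExpand_spec (points : List Int) :
    ∀ (k : Nat) (s e : Int) (acc : List Int),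
      pvAExpand points s e acc k =
        (s - k, e + k,
          acc ++ (List.range k).flatMap
            (fun (j : Nat) => [pvGet points (s - 1 - (j : Int)), pvGet points (e + 1 + (j : Int))])) := by
  intro k
  induction k with
  | zero => intro s e acc; simp [pvAExpand]
  | succ k ih =>
    intro s e acc
    rw [pvAExpand, ih]
    have h1 : s - 1 - (k : Int) = s - ((k : Nat) + 1 : Nat) := by push_cast; ring
    have h2 : e + 1 + (k : Int) = e + ((k : Nat) + 1 : Nat) := by push_cast; ring
    refine Prod.ext (by push_cast; ring) (Prod.ext (by push_cast; ring) ?_)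
    show (acc ++ [pvGet points (s - 1), pvGet points (e + 1)]) ++
        (List.range k).flatMap (fun (j : Nat) =>
          [pvGet points (s - 1 - 1 - (j : Int)), pvGet points (e + 1 + 1 + (j : Int))]) =
      acc ++ (List.range (k + 1)).flatMap (fun (j : Nat) =>
          [pvGet points (s - 1 - (j : Int)), pvGet points (e + 1 + (j : Int))])
    rw [List.range_succ_eq_map, List.flatMap_cons, List.append_assoc]
    congr 1
    simp only [Nat.cast_zero, sub_zero, add_zero]
    congr 1
    rw [List.flatMap_map]
    refine List.flatMap_congr ?_
    intro j hj
    push_cast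
    ring_nf

-- the accumulator is only appended to
theorem pvAGo_acc (points : List Int) (target p : Int) :
    ∀ (is : List Nat) (acc : List Int),
      pvAGo points target p is acc = acc ++ pvAGo points target p is [] := by
  intro is
  induction is with
  | nil => intro acc; simp [pvAGo]
  | cons i rest ih =>
    intro acc
    have key : ∀ b, pvAGo points target p rest (acc ++ b) = acc ++ pvAGo points target p rest b := by
      intro b
      rw [ih (acc ++ b), ih b, List.append_assoc]
    simp only [pvAGo, pvAExpand_spec]
    split_ifs with h1 h2 h3 h4
    · simp
    · simp only [List.append_assoc, List.nil_append]; exact key _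
    · simp only [List.append_assoc, List.nil_append]; exact key _
    · simp only [List.append_assoc, List.nil_append]; exact key _
    · exact ih acc

theorem pvBGo_acc (points : List Int) (target p : Int) :
    ∀ (is : List Nat) (acc : List Int),
      pvBGo points target p is acc = acc ++ pvBGo points target p is [] := by
  intro is
  induction is with
  | nil => intro acc; simp [pvBGo]
  | cons i rest ih =>
    intro acc
    have key : ∀ b, pvBGo points target p rest (acc ++ b) = acc ++ pvBGo points target p rest b := by
      intro b
      rw [ih (acc ++ b), ih b, List.append_assoc]
    simp only [pvBGo]
    split_ifs with h1 h2 h3 h4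
    · simp
    · simp only [List.nil_append]; exact key _
    · simp only [List.append_assoc, List.nil_append]; exact key _
    · simp only [List.append_assoc, List.nil_append]; exact key _
    · exact ih acc

-- A's interleaved two-pointer index order is a permutation of the contiguous window of indices
theorem pvIdx_perm (s : Int) :
    ∀ m : Nat,
      ([s, s + 1] ++ (List.range m).flatMap
          (fun (j : Nat) => [s - 1 - (j : Int), s + 2 + (j : Int)])).Perm
        (PySem.List.pyRange (s - m) (s + 2 + m) 1) := by
  intro m
  induction m with
  | zero =>
    simp only [Nat.cast_zero, List.range_zero, List.flatMap_nil, List.append_nil, sub_zero, add_zero]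
    rw [PySem.List.pyRange_one_cons (by omega), PySem.List.pyRange_one_cons (by omega),
        PySem.List.pyRange_one_eq_nil (by omega)]
  | succ m ih =>
    rw [List.range_succ, List.flatMap_append]
    have h1 : PySem.List.pyRange (s - (m + 1 : Nat)) (s + 2 + (m + 1 : Nat)) 1 =
        (s - 1 - (m : Int)) :: (PySem.List.pyRange (s - m) (s + 2 + m) 1 ++ [s + 2 + m]) := by
      rw [show (s - ((m : Nat) + 1 : Nat) : Int) = s - 1 - (m : Int) by push_cast; ring,
          show (s + 2 + ((m : Nat) + 1 : Nat) : Int) = (s + 2 + (m : Int)) + 1 by push_cast; ring,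
          PySem.List.pyRange_one_cons (by omega),
          show s - 1 - (m : Int) + 1 = s - (m : Int) by ring,
          PySem.List.pyRange_one_succ_right (by omega)]
    rw [h1, List.flatMap_singleton, ← List.append_assoc]
    refine List.Perm.trans (ih.append_right [s - 1 - (m : Int), s + 2 + (m : Int)]) ?_
    have h2 : (s - 1 - (m : Int)) :: (PySem.List.pyRange (s - m) (s + 2 + m) 1 ++ [s + 2 + m]) =
        ((s - 1 - (m : Int)) :: PySem.List.pyRange (s - m) (s + 2 + m) 1) ++ [s + 2 + m] := by simp
    rw [h2,
        show ([s - 1 - (m : Int), s + 2 + (m : Int)]) = [s - 1 - (m : Int)] ++ [s + 2 + (m : Int)] from rfl,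
        ← List.append_assoc]
    exact List.Perm.append_right _ (List.perm_append_singleton _ _)

-- values at A's interleaved indices are a permutation of the in-range slice
theorem pvBlock_perm (points : List Int) (i : Nat) (m : Nat)
    (hlo : (m : Int) ≤ (i : Int)) (hhi : (i : Int) + m + 2 ≤ (points.length : Int)) :
    ([pvGet points (i : Int), pvGet points ((i : Int) + 1)] ++ (List.range m).flatMap
        (fun (j : Nat) => [pvGet points ((i : Int) - 1 - (j : Int)),
                           pvGet points ((i : Int) + 1 + 1 + (j : Int))])).Perm
      (PySem.List.slice points (some ((i : Int) - m)) (some ((i : Int) + m + 2))) := by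
  have h := (pvIdx_perm (i : Int) m).map (fun j => PySem.List.pyGetD points j 0)
  rw [slice_as_map points ((i : Int) - m) ((i : Int) + m + 2) (by omega) (by omega) (by omega)]
  have harr : (i : Int) + m + 2 = (i : Int) + 2 + m := by ring
  rw [harr]
  refine List.Perm.trans ?_ h
  rw [List.map_append, List.map_flatMap]
  simp only [List.map_cons, List.map_nil]
  apply List.Perm.of_eq
  have hfm : (List.range m).flatMap
        (fun (j : Nat) => [pvGet points ((i : Int) - 1 - (j : Int)),
                           pvGet points ((i : Int) + 1 + 1 + (j : Int))])
      = (List.range m).flatMap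
        (fun (j : Nat) => [PySem.List.pyGetD points ((i : Int) - 1 - (j : Int)) 0,
                           PySem.List.pyGetD points ((i : Int) + 2 + (j : Int)) 0]) := by
    refine List.flatMap_congr ?_
    intro j hj
    have harith : (i : Int) + 1 + 1 + (j : Int) = (i : Int) + 2 + (j : Int) := by ring
    rw [pvGet, pvGet, harith]
  rw [hfm]
  simp [pvGet]


-- main loop invariant: on admitted inputs the two loops produce permutations of each other
theorem pvGo_perm (points : List Int) (target p : Int)
    (hpre : Pre_obtain_x_values points target p) :
    ∀ is : List Nat, (∀ i ∈ is, i + 1 < points.length) →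
      (pvAGo points target p is []).Perm (pvBGo points target p is []) := by
  intro is
  induction is with
  | nil => intro _; simp [pvAGo, pvBGo]
  | cons i rest ih =>
    intro hmem
    have hi : i + 1 < points.length := hmem i (by simp)
    have ihr := ih (fun j hj => hmem j (List.mem_cons_of_mem _ hj))
    by_cases hmatch : pvGet points (i : Int) < target ∧ target < pvGet points ((i : Int) + 1)
    · have hg1 : pvGet points (i : Int) = points.getD i 0 := by simp [pvGet]
      have hg2 : pvGet points ((i : Int) + 1) = points.getD (i + 1) 0 := by
        have hc : ((i : Int) + 1) = ((i + 1 : Nat) : Int) := by push_cast; ring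
        rw [pvGet, hc, PySem.List.pyGetD_natCast]
      obtain ⟨hp1, hp2⟩ :=
        hpre i (by omega) (by rw [← hg1]; exact hmatch.1) (by rw [← hg2]; exact hmatch.2)
      by_cases hp : p = 1
      · simp only [pvAGo, pvBGo, if_pos hmatch, if_pos hp]
        apply List.Perm.of_eq
        rw [slice_as_map points (i : Int) ((i : Int) + 2) (by omega) (by omega) (by omega),
            PySem.List.pyRange_one_cons (by omega), PySem.List.pyRange_one_cons (by omega),
            PySem.List.pyRange_one_eq_nil (by omega)]
        simp [pvGet]
      · have hp2' := hp2 (by omega)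
        obtain ⟨k, hk⟩ : ∃ k : Nat, PySem.Int.floordiv p 2 = (k : Int) := by
          refine ⟨(PySem.Int.floordiv p 2).toNat, ?_⟩
          have := PySem.Int.floordiv_eq_ediv_of_pos (a := p) (b := 2) (by omega)
          omega
        have hk1 : 1 ≤ k := by
          have := PySem.Int.floordiv_eq_ediv_of_pos (a := p) (b := 2) (by omega)
          omega
        have hklo : (k : Int) ≤ (i : Int) := by rw [← hk]; exact hp2'.1
        have hkhi : (i : Int) + k + 2 ≤ (points.length : Int) := by rw [← hk]; exact hp2'.2
        have hmA : Int.tdiv p 2 = (k : Int) := by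
          rw [← hk, PySem.Int.floordiv_eq_ediv_of_pos (by omega),
              Int.tdiv_eq_ediv_of_nonneg (by omega)]
        have hr : PySem.Int.mod p 2 = 0 ∨ PySem.Int.mod p 2 = 1 := by
          have h0 := PySem.Int.mod_nonneg (a := p) (b := 2) (by omega)
          have h2 := PySem.Int.mod_lt (a := p) (b := 2) (by omega)
          omega
        rcases hr with hr0 | hr1
        · -- even order: m-1 interleaved pairs, then the nearest outer endpoint
          simp only [pvAGo, pvBGo, if_pos hmatch, if_neg hp, hmA, hk, hr0, pvAExpand_spec]
          norm_num
          have hc1 : (i : Int) - ((k - 1 : Nat) : Int) - 1 = (i : Int) - (k : Int) := by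
            push_cast [hk1]; ring
          have hc2 : (i : Int) + 1 + ((k - 1 : Nat) : Int) + 1 = (i : Int) + (k : Int) + 1 := by
            push_cast [hk1]; ring
          rw [hc1, hc2, pvAGo_acc, pvBGo_acc]
          refine List.Perm.append ?_ ihr
          have hb := pvBlock_perm points i (k - 1) (by push_cast [hk1]; omega)
            (by push_cast [hk1]; omega)
          have hs1 : (i : Int) - ((k - 1 : Nat) : Int) = (i : Int) - (k : Int) + 1 := by
            push_cast [hk1]; ring
          have hs2 : (i : Int) + ((k - 1 : Nat) : Int) + 2 = (i : Int) + (k : Int) + 1 := by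
            push_cast [hk1]; ring
          rw [hs1, hs2] at hb
          split_ifs <;>
            simpa [List.append_assoc] using hb.append_right _
        · -- odd order: m interleaved pairs = the symmetric window
          simp only [pvAGo, pvBGo, if_pos hmatch, if_neg hp, hmA, hk, hr1, pvAExpand_spec]
          norm_num
          rw [pvAGo_acc, pvBGo_acc]
          refine List.Perm.append ?_ ihr
          have hb := pvBlock_perm points i k (by omega) (by omega)
          simpa using hb
    · simp only [pvAGo, pvBGo, if_neg hmatch]
      exact ihr

-- ===== VERDICT (by name: the statement is the Claim_ definition above) =====
theorem obtain_x_values_spec : Claim_equal_obtain_x_values := by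
  intro points target p _hdom hpre
  show obtain_x_values points target p = obtain_x_values_alt points target p
  rw [obtain_x_values, obtain_x_values_alt,
      PySem.List.sorted_id_eq_sorted_id_iff_perm]
  exact pvGo_perm points target p hpre (List.range (points.length - 1))
    (fun i hi => by rw [List.mem_range] at hi; omega)
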